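-- pv_equiv track=rewrite | github.com/DeconvFFT/Autograder | inject_scale.py | convertInt
-- ===== SOURCE A (Python) =====
-- def convertInt(str):
--     value = 0
--     for c in str:
--         if("A" == c):
--             mask = 1 << 4
--             value = mask ^ value
--         if("B" == c):
--             mask = 1 << 3
--             value = mask ^ value
--         if("C" == c):
--             mask = 1 << 2
--             value = mask ^ value
--         if("D" == c):
--             mask = 1 << 1
--             value = mask ^ value
--         if("E" == c):
--             value = 1 ^ value
--     return value
-- ===== SOURCE B (Python) =====
-- def convertInt(str):
--     cnt = {}
--     for c in str:
--         cnt[c] = cnt.get(c, 0) + 1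
--     value = 0
--     for ch, bit in (('A', 4), ('B', 3), ('C', 2), ('D', 1), ('E', 0)):
--         if cnt.get(ch, 0) % 2 == 1:
--             value |= 1 << bit
--     return value
-- ===== Notes on version B (the rewrite author's own statement) =====
-- stated objective: alternative
-- what changed: B builds a character frequency table in one pass and then assembles the result by OR-ing each bit from the parity of the relevant count, instead of XOR-toggling the value character by character.
import Mathlib
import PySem

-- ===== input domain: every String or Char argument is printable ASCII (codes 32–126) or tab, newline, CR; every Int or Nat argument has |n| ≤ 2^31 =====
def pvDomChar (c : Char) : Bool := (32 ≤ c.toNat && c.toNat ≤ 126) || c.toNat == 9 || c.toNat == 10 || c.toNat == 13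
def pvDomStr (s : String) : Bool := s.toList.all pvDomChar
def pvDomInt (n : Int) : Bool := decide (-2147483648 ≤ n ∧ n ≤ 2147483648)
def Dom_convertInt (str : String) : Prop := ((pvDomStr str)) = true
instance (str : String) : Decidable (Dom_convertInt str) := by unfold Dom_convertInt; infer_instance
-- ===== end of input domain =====

-- B replaces A's per-character XOR-toggle pass by a count-then-assemble-by-parity pass; alternative decomposition, same cost.

-- ===== PORT A =====
-- literal transliteration of A: one pass, XOR-toggling one bit per matching character
def convertIntStep (value : Int) (c : Char) : Int :=
  let value := if 'A' = c then PySem.Int.bxor ((1 : Int) <<< 4) value else value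
  let value := if 'B' = c then PySem.Int.bxor ((1 : Int) <<< 3) value else value
  let value := if 'C' = c then PySem.Int.bxor ((1 : Int) <<< 2) value else value
  let value := if 'D' = c then PySem.Int.bxor ((1 : Int) <<< 1) value else value
  let value := if 'E' = c then PySem.Int.bxor (1 : Int) value else value
  value

def convertInt (str : String) : Int :=
  str.toList.foldl convertIntStep 0

-- ===== PORT B =====
-- literal transliteration of Source B: build a frequency dict, then OR in each bit by count parity
def convertInt_alt (str : String) : Int :=
  let cnt : PySem.Dict Char Int :=
    str.toList.foldl (fun d c => d.insert c (d.getD c 0 + 1)) PySem.Dict.empty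
  [('A', 4), ('B', 3), ('C', 2), ('D', 1), ('E', 0)].foldl
    (fun value p =>
      if PySem.Int.mod (cnt.getD p.1 0) 2 == 1 then PySem.Int.bor value ((1 : Int) <<< p.2)
      else value)
    (0 : Int)

-- ===== PRECONDITION & SPEC =====
def Spec_convertInt (str : String) (out : Int) : Prop := out = convertInt_alt str
instance (str : String) (out : Int) : Decidable (Spec_convertInt str out) := by unfold Spec_convertInt; infer_instance

-- ===== CLAIM (what is proved, stated in full; the proofs are below) =====
def Claim_equal_convertInt : Prop := ∀ (str : String), Dom_convertInt str → Spec_convertInt str (convertInt str)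

-- ===== LEMMAS AND PROOFS =====

-- parity of the count of x in l, as a Bool
def pvPar (l : List Char) (x : Char) : Bool := l.count x % 2 == 1

-- B's assembly of the final value from the five parities
def pvEnc (a b c d e : Bool) : Int :=
  PySem.Int.bor (PySem.Int.bor (PySem.Int.bor (PySem.Int.bor (PySem.Int.bor (0 : Int)
    (if a then ((1 : Int) <<< 4) else 0))
    (if b then ((1 : Int) <<< 3) else 0))
    (if c then ((1 : Int) <<< 2) else 0))
    (if d then ((1 : Int) <<< 1) else 0))
    (if e then ((1 : Int) <<< 0) else 0)

theorem pvModCast (n : Nat) : (PySem.Int.mod (n : Int) 2 == 1) = (n % 2 == 1) := by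
  rw [PySem.Int.mod_eq_emod_of_pos (by norm_num)]
  cases h : (n % 2 == 1) <;> simp_all <;> omega

theorem pvAlt_eq_enc (s : String) :
    convertInt_alt s = pvEnc (pvPar s.toList 'A') (pvPar s.toList 'B') (pvPar s.toList 'C')
      (pvPar s.toList 'D') (pvPar s.toList 'E') := by
  simp only [convertInt_alt, pvEnc, pvPar, List.foldl,
    PySem.Dict.getD_foldl_insert_add_one, PySem.Dict.getD_empty, zero_add, pvModCast]
  split <;> split <;> split <;> split <;> split <;> rfl

theorem pvParitySucc (n : Nat) : ((n + 1) % 2 == 1) = !(n % 2 == 1) := by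
  cases h : (n % 2 == 1) <;> simp_all <;> omega

theorem pvParCons (l : List Char) (c x : Char) :
    pvPar (c :: l) x = if x = c then !(pvPar l x) else pvPar l x := by
  by_cases h : x = c
  · simp [pvPar, h, pvParitySucc]
  · have hbe : (c == x) = false := beq_eq_false_iff_ne.mpr (fun hh => h hh.symm)
    simp [pvPar, List.count_cons, hbe, h]

theorem pvXorIf (P : Prop) [inst : Decidable P] (a r : Bool) :
    xor (if P then !a else a) r = xor a (if P then !r else r) := by
  split <;> cases a <;> cases r <;> simp

theorem pvStep (x : Char) (a b c d e : Bool) :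
    convertIntStep (pvEnc a b c d e) x =
      pvEnc (if 'A' = x then !a else a) (if 'B' = x then !b else b)
            (if 'C' = x then !c else c) (if 'D' = x then !d else d)
            (if 'E' = x then !e else e) := by
  unfold convertIntStep
  by_cases hA : 'A' = x
  · subst hA; cases a <;> cases b <;> cases c <;> cases d <;> cases e <;> decide
  by_cases hB : 'B' = x
  · subst hB; cases a <;> cases b <;> cases c <;> cases d <;> cases e <;> decide
  by_cases hC : 'C' = x
  · subst hC; cases a <;> cases b <;> cases c <;> cases d <;> cases e <;> decide
  by_cases hD : 'D' = x
  · subst hD; cases a <;> cases b <;> cases c <;> cases d <;> cases e <;> decide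
  by_cases hE : 'E' = x
  · subst hE; cases a <;> cases b <;> cases c <;> cases d <;> cases e <;> decide
  simp [hA, hB, hC, hD, hE]

theorem pvFoldEnc (l : List Char) (a b c d e : Bool) :
    l.foldl convertIntStep (pvEnc a b c d e) =
      pvEnc (xor a (pvPar l 'A')) (xor b (pvPar l 'B')) (xor c (pvPar l 'C'))
            (xor d (pvPar l 'D')) (xor e (pvPar l 'E')) := by
  induction l generalizing a b c d e with
  | nil => simp [pvPar]
  | cons h t ih =>
    rw [List.foldl_cons, pvStep, ih]
    congr 1 <;> rw [pvParCons, ← pvXorIf]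

theorem convertInt_eq_enc (s : String) :
    convertInt s = pvEnc (pvPar s.toList 'A') (pvPar s.toList 'B') (pvPar s.toList 'C')
      (pvPar s.toList 'D') (pvPar s.toList 'E') := by
  have h0 : (0 : Int) = pvEnc false false false false false := by decide
  rw [convertInt, h0, pvFoldEnc]
  simp

-- ===== VERDICT (by name: the statement is the Claim_ definition above) =====
theorem convertInt_spec : Claim_equal_convertInt := by
  intro s _
  unfold Spec_convertInt
  rw [convertInt_eq_enc, pvAlt_eq_enc]
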